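-- pv_equiv track=rewrite | github.com/phamvh/pythonProject | algos/digits_in_string.py | evaluate
-- ===== SOURCE A (Python) =====
-- def evaluate(s: str) -> bool:
--     if not s or len(s) == 0:
--         return False
--     first_index = -1
--     encounted = False
--     anypair = False
--     count = 0
--     for i in range(0, len(s)):
--         if s[i].isdigit():
--             if not encounted:
--                 encounted = True
--                 first_index = i
--                 count = 0
--             else:
--                 if count == 3:
--                     sum = int(s[first_index]) + int(s[i])
--                     if sum != 10:
--                         return False
--                     else:
--                         first_index = i
--                         count = 0
--                         anypair = True
--                 else:
--                     first_index = i
--                     count = 0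
--         elif s[i] == "?":
--             count += 1
--     return anypair
-- ===== SOURCE B (Python) =====
-- def evaluate(s: str) -> bool:
--     if not s:
--         return False
--     entries = []
--     q = 0
--     for ch in s:
--         if ch.isdigit():
--             entries.append((int(ch), q))
--             q = 0
--         elif ch == "?":
--             q += 1
--     found = False
--     for (a, _), (b, qb) in zip(entries, entries[1:]):
--         if qb == 3:
--             if a + b != 10:
--                 return False
--             found = True
--     return found
-- ===== Notes on version B (the rewrite author's own statement) =====
-- stated objective: simpler
-- what changed: Replaces A's fused five-variable state machine (index of last digit, encounted/anypair flags, running '?' counter) by two plain passes: build a list of (digit value, '?'-count since previous digit) entries, then check consecutive entries whose gap count is 3.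
import Mathlib
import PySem

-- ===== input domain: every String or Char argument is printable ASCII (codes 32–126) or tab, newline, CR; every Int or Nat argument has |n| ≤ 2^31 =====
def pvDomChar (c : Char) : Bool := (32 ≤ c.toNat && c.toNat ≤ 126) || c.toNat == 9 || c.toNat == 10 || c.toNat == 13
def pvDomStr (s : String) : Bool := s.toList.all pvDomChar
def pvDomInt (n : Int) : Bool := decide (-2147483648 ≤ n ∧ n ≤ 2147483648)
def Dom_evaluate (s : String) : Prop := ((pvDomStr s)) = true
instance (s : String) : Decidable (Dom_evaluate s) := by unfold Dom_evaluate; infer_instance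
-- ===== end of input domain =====

-- B replaces A's fused scan/state machine by two passes — collect (digit, '?'-since-last-digit)
-- entries, then check consecutive entries — objective: simpler decomposition, same cost.

-- ===== PORT A =====
-- A's loop: state (encounted, first = char at first_index, anypair, count); early 'return False' = false.
def evalLoopA : List Char → Bool → Char → Bool → Int → Bool
  | [], _, _, anypair, _ => anypair
  | c :: rest, encounted, first, anypair, count =>
    if PySem.Chars.isdigit c then
      if !encounted then
        evalLoopA rest true c anypair 0
      else
        if count = 3 then
          if (PySem.Int.ofChars? [first]).getD 0 + (PySem.Int.ofChars? [c]).getD 0 ≠ 10 then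
            false
          else
            evalLoopA rest true c true 0
        else
          evalLoopA rest true c anypair 0
    else if c = '?' then
      evalLoopA rest encounted first anypair (count + 1)
    else
      evalLoopA rest encounted first anypair count

def evaluate (s : String) : Bool :=
  if s.toList = [] then false
  else evalLoopA s.toList false ' ' false 0

-- ===== PORT B =====
-- first pass: (digit value, number of '?' since the previous digit) for each digit
def scanQ : List Char → Int → List (Int × Int)
  | [], _ => []
  | c :: rest, q =>
    if PySem.Chars.isdigit c then
      ((PySem.Int.ofChars? [c]).getD 0, q) :: scanQ rest 0
    else if c = '?' then
      scanQ rest (q + 1)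
    else
      scanQ rest q

-- second pass: consecutive entries (zip(entries, entries[1:]))
def pairCheck : List (Int × Int) → Bool → Bool
  | [], found => found
  | [_], found => found
  | (a, _) :: (b, qb) :: rest, found =>
    if qb = 3 then
      if a + b ≠ 10 then false
      else pairCheck ((b, qb) :: rest) true
    else
      pairCheck ((b, qb) :: rest) found

def evaluate_alt (s : String) : Bool :=
  if s.toList = [] then false
  else pairCheck (scanQ s.toList 0) false

-- ===== PRECONDITION & SPEC =====
def Spec_evaluate (s : String) (out : Bool) : Prop := out = evaluate_alt s
instance (s : String) (out : Bool) : Decidable (Spec_evaluate s out) := by unfold Spec_evaluate; infer_instance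

-- ===== CLAIM (what is proved, stated in full; the proofs are below) =====
def Claim_equal_evaluate : Prop := ∀ (s : String), Dom_evaluate s → Spec_evaluate s (evaluate s)

-- ===== LEMMAS AND PROOFS =====

-- pairCheck never looks at the '?'-count of the FIRST entry
theorem pairCheck_head_snd (a q1 q2 : Int) (rest : List (Int × Int)) (f : Bool) :
    pairCheck ((a, q1) :: rest) f = pairCheck ((a, q2) :: rest) f := by
  cases rest with
  | nil => rfl
  | cons p r => cases p; simp [pairCheck]

-- invariant after the first digit: A's fused loop = B's pairwise check with the last digit prepended
theorem loopA_encounted (cs : List Char) : ∀ (d : Char) (anypair : Bool) (c : Int),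
    evalLoopA cs true d anypair c
      = pairCheck (((PySem.Int.ofChars? [d]).getD 0, 0) :: scanQ cs c) anypair := by
  induction cs with
  | nil => intro d anypair c; simp [evalLoopA, scanQ, pairCheck]
  | cons c0 rest ih =>
    intro d anypair c
    by_cases hdig : PySem.Chars.isdigit c0
    · by_cases hc : c = 3
      · subst hc
        by_cases hsum : (PySem.Int.ofChars? [d]).getD 0 + (PySem.Int.ofChars? [c0]).getD 0 ≠ 10
        · simp [evalLoopA, scanQ, pairCheck, hdig, hsum]
        · simp [evalLoopA, scanQ, pairCheck, hdig, hsum, ih]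
          by_cases ha : anypair <;> simp [pairCheck_head_snd _ 3 0]
      · simp [evalLoopA, scanQ, pairCheck, hdig, hc, ih]
        exact pairCheck_head_snd _ 0 c _ _
    · by_cases hq : c0 = '?'
      · subst hq; simp [evalLoopA, scanQ, hdig, ih]
      · simp [evalLoopA, scanQ, hdig, hq, ih]

-- invariant before the first digit: A's loop = B's check, for any counters
theorem loopA_start (cs : List Char) : ∀ (first : Char) (count q : Int),
    evalLoopA cs false first false count = pairCheck (scanQ cs q) false := by
  induction cs with
  | nil => intro first count q; simp [evalLoopA, scanQ, pairCheck]
  | cons c0 rest ih =>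
    intro first count q
    by_cases hdig : PySem.Chars.isdigit c0
    · simp only [evalLoopA, scanQ, hdig, if_true, Bool.not_false]
      rw [loopA_encounted, pairCheck_head_snd _ 0 q]
    · by_cases hq : c0 = '?'
      · subst hq
        simp only [evalLoopA, scanQ, hdig, ite_false]
        exact ih first (count + 1) (q + 1)
      · simp only [evalLoopA, scanQ, hdig, hq]
        exact ih first count q

-- ===== VERDICT (by name: the statement is the Claim_ definition above) =====
theorem evaluate_spec : Claim_equal_evaluate := by
  intro s _
  unfold Spec_evaluate evaluate evaluate_alt
  by_cases h : s.toList = []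
  · simp [h]
  · simp only [h, ite_false]
    exact loopA_start s.toList ' ' 0 0
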